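-- pv_equiv track=rewrite | github.com/haourgot123/Python | Contest4/B23_KIEM_TRA_MANG_TOAN_CHAN.py | check
-- ===== SOURCE A (Python) =====
-- def check(a,left, right):
--     if left > right:
--         return True
--     else:
--         if a[left] % 2 == 1:
--             return False
--         else:
--             return check(a,left + 1, right)
-- ===== SOURCE B (Python) =====
-- def check(a, left, right):
--     return all(a[i] % 2 == 0 for i in range(left, right + 1))
-- ===== Notes on version B (the rewrite author's own statement) =====
-- stated objective: idiomatic
-- what changed: Replaced the explicit recursion with a single iterative all(...) over range(left, right+1), which short-circuits on the first odd element exactly as A's recursion does.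
import Mathlib
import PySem

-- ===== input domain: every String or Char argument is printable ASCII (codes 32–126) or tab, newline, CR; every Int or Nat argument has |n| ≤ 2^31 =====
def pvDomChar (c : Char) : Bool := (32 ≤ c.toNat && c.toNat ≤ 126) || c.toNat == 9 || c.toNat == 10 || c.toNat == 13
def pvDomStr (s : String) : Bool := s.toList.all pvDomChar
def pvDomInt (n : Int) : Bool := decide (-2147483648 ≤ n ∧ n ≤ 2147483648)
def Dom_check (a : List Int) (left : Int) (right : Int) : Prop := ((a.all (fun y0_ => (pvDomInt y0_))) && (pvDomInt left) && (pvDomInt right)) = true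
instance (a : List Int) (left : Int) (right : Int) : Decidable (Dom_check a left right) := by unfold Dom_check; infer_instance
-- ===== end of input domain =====

-- B replaces A's recursion by one iterative all(...) scan over range(left, right+1); idiomatic, same cost.


-- ===== PORT A =====
def check (a : List Int) (left : Int) (right : Int) : Bool :=
  if left > right then true
  else
    match PySem.List.pyGet? a left with
    | none => false  -- Python raises IndexError here; excluded by Pre_check
    | some v =>
      if PySem.Int.mod v 2 = 1 then false
      else check a (left + 1) right
termination_by (right + 1 - left).toNat
decreasing_by omega

-- ===== PORT B =====
def check_alt (a : List Int) (left : Int) (right : Int) : Bool :=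
  (PySem.List.pyRange left (right + 1) 1).all
    (fun i => PySem.Int.mod ((PySem.List.pyGet? a i).getD 0) 2 == 0)

-- ===== PRECONDITION & SPEC =====
-- Pre_ excludes exactly the inputs where A raises IndexError: the scan starts at a valid
-- index and either the whole range fits inside the list or some in-list index of the scan
-- holds an odd element, stopping the scan before it runs off the end (B raises there too).
def Pre_check (a : List Int) (left : Int) (right : Int) : Prop :=
  left > right ∨
  (PySem.Raise.InRange a.length left ∧
    (right < (a.length : Int) ∨
     ∃ i ∈ PySem.List.pyRange left (a.length : Int) 1,
       PySem.Int.mod ((PySem.List.pyGet? a i).getD 0) 2 = 1))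
instance (a : List Int) (left : Int) (right : Int) : Decidable (Pre_check a left right) := by
  unfold Pre_check PySem.Raise.InRange; infer_instance

def pvWitness_check : List Int × Int × Int := ([2, 4], 0, 1)

def Spec_check (a : List Int) (left : Int) (right : Int) (out : Bool) : Prop := out = check_alt a left right
instance (a : List Int) (left : Int) (right : Int) (out : Bool) : Decidable (Spec_check a left right out) := by unfold Spec_check; infer_instance

-- ===== CLAIM (what is proved, stated in full; the proofs are below) =====
def Claim_equal_check : Prop := ∀ (a : List Int) (left : Int) (right : Int), Dom_check a left right → Pre_check a left right → Spec_check a left right (check a left right)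

-- ===== LEMMAS AND PROOFS =====

lemma get_some_of_pre (a : List Int) (left right : Int)
    (hpre : Pre_check a left right) (hlr : ¬ left > right) :
    ∃ v, PySem.List.pyGet? a left = some v := by
  rcases hpre with h | ⟨hin, _⟩
  · exact absurd h hlr
  · cases heq : PySem.List.pyGet? a left with
    | none => rw [PySem.List.pyGet?_eq_none_iff] at heq; exact absurd hin heq
    | some v => exact ⟨v, rfl⟩

lemma pre_step (a : List Int) (left right : Int) (v : Int)
    (hpre : Pre_check a left right)
    (hv : PySem.List.pyGet? a left = some v)
    (hev : ¬ PySem.Int.mod v 2 = 1) :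
    Pre_check a (left + 1) right := by
  by_cases hlr : left + 1 > right
  · exact Or.inl hlr
  rcases hpre with h | ⟨hin, hrest⟩
  · exact Or.inl (by omega)
  obtain ⟨hin1, hin2⟩ := hin
  have hlen : left + 1 < (a.length : Int) := by
    by_contra h
    push Not at h
    rcases hrest with hr | ⟨i, hi, hodd⟩
    · omega
    · rw [PySem.List.mem_pyRange_one] at hi
      have : i = left := by omega
      subst this
      rw [hv] at hodd
      simp only [Option.getD_some] at hodd
      exact hev hodd
  refine Or.inr ⟨⟨by omega, hlen⟩, ?_⟩
  rcases hrest with hr | ⟨i, hi, hodd⟩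
  · exact Or.inl hr
  · rw [PySem.List.mem_pyRange_one] at hi
    by_cases hil : i = left
    · subst hil
      rw [hv] at hodd
      simp only [Option.getD_some] at hodd
      exact absurd hodd hev
    · exact Or.inr ⟨i, by rw [PySem.List.mem_pyRange_one]; omega, hodd⟩

lemma check_eq_alt (a : List Int) : ∀ (n : Nat) (left right : Int),
    (right + 1 - left).toNat = n → Pre_check a left right →
    check a left right = check_alt a left right := by
  intro n
  induction n with
  | zero =>
    intro left right hn _
    have hlr : left > right := by omega
    rw [check, check_alt, if_pos hlr, PySem.List.pyRange_one_eq_nil (by omega)]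
    rfl
  | succ k ih =>
    intro left right hn hpre
    have hlr : ¬ left > right := by omega
    have hcons := PySem.List.pyRange_one_cons (a := left) (b := right + 1) (by omega)
    obtain ⟨v, hv⟩ := get_some_of_pre a left right hpre hlr
    rw [check, if_neg hlr, hv]
    unfold check_alt
    rw [hcons, List.all_cons, hv]
    show (if PySem.Int.mod v 2 = 1 then false else check a (left + 1) right) = _
    by_cases hodd : PySem.Int.mod v 2 = 1
    · rw [if_pos hodd]
      simp only [Option.getD_some, hodd]
      rw [show ((1:Int) == 0) = false from rfl, Bool.false_and]
    · rw [if_neg hodd]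
      have hrest := ih (left + 1) right (by omega) (pre_step a left right v hpre hv hodd)
      rw [hrest]
      unfold check_alt
      simp only [Option.getD_some]
      have : (PySem.Int.mod v 2 == 0) = true := by
        have := PySem.Int.mod_two_eq v
        rcases this with h | h
        · rw [h]; rfl
        · exact absurd h hodd
      rw [this, Bool.true_and]

-- ===== VERDICT (by name: the statement is the Claim_ definition above) =====
theorem check_spec : Claim_equal_check := by
  intro a left right _ hpre
  unfold Spec_check
  exact check_eq_alt a (right + 1 - left).toNat left right rfl hpre
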